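-- pv_equiv track=rewrite | github.com/Talari-Ashwin-Raj/FinanceAnomalyDetector | preprocess.py | process_transaction
-- ===== SOURCE A (Python) =====
-- def process_transaction(transaction_ref):
--     """
--     Parses transaction reference strings to extract payment type and merchant category.
--     """
--     parts = str(transaction_ref).split('/')
--     payment_type = parts[0].lower() if len(parts) > 0 else 'unknown'
--     merchant = parts[3].lower().strip() if len(parts) > 3 else ''
--
--     category = "others"
--     if merchant:
--         if any(kw in merchant for kw in ['swiggy', 'zomato', 'restaurant', 'pizza', 'kfc', 'mcdonalds']): category = "food"
--         elif any(kw in merchant for kw in ['netflix', 'spotify', 'prime', 'hotstar', 'multiplex', 'cinema']): category = "entertainment"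
--         elif any(kw in merchant for kw in ['udemy', 'coursera', 'byjus', 'edx', 'school', 'college']): category = "education"
--         elif any(kw in merchant for kw in ['uber', 'ola', 'rapido', 'irctc', 'indigo', 'airindia', 'railway']): category = "travel"
--         elif any(kw in merchant for kw in ['amazon', 'flipkart', 'myntra', 'dmart', 'bigbazaar', 'ajio', 'reliance']): category = "shopping"
--         elif any(kw in merchant for kw in ['electricity', 'water', 'gas', 'bill', 'bescom', 'recharge']): category = "utilities"
--         elif any(kw in merchant for kw in ['salary', 'payroll', 'stipend']): category = "salary"
--         elif any(kw in merchant for kw in ['apollo', 'pharmeasy', 'hospital', 'medical', 'pharmacy', 'health']): category = "medical"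
--         elif any(kw in merchant for kw in ['jio', 'vi', 'airtel', 'bsnl', 'telecom']): category = "recharge"
--     return payment_type, category
-- ===== SOURCE B (Python) =====
-- # B: instead of testing each keyword against the merchant, index all keywords in a
-- # hash map keyword -> category rank, enumerate the merchant's substrings of the
-- # keyword lengths (2..11) and keep the minimum rank found (ranks follow A's
-- # priority order), mapping the best rank back to its category name.
--
-- CATS = ["food", "entertainment", "education", "travel", "shopping",
--         "utilities", "salary", "medical", "recharge"]
--
-- KW_RANK = {'swiggy': 0, 'zomato': 0, 'restaurant': 0, 'pizza': 0, 'kfc': 0, 'mcdonalds': 0, 'netflix': 1, 'spotify': 1, 'prime': 1, 'hotstar': 1, 'multiplex': 1, 'cinema': 1, 'udemy': 2, 'coursera': 2, 'byjus': 2, 'edx': 2, 'school': 2, 'college': 2, 'uber': 3, 'ola': 3, 'rapido': 3, 'irctc': 3, 'indigo': 3, 'airindia': 3, 'railway': 3, 'amazon': 4, 'flipkart': 4, 'myntra': 4, 'dmart': 4, 'bigbazaar': 4, 'ajio': 4, 'reliance': 4, 'electricity': 5, 'water': 5, 'gas': 5, 'bill': 5, 'bescom': 5, 'recharge': 5, 'salary':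 6, 'payroll': 6, 'stipend': 6, 'apollo': 7, 'pharmeasy': 7, 'hospital': 7, 'medical': 7, 'pharmacy': 7, 'health': 7, 'jio': 8, 'vi': 8, 'airtel': 8, 'bsnl': 8, 'telecom': 8}
--
-- KW_LENS = sorted({len(k) for k in KW_RANK})  # [2, 3, ..., 11]
--
--
-- def process_transaction(transaction_ref):
--     parts = str(transaction_ref).split('/')
--     payment_type = parts[0].lower() if len(parts) > 0 else 'unknown'
--     merchant = parts[3].lower().strip() if len(parts) > 3 else ''
--     best = len(CATS)
--     for i in range(len(merchant)):
--         for L in KW_LENS: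
--             best = min(best, KW_RANK.get(merchant[i:i + L], len(CATS)))
--     category = CATS[best] if best < len(CATS) else 'others'
--     return payment_type, category
-- ===== Notes on version B (the rewrite author's own statement) =====
-- stated objective: alternative
-- what changed: Replaces the nine-branch keyword-by-keyword elif cascade with a hash index from keyword to priority rank: B enumerates the merchant's substrings of the keyword lengths, looks each up in the dict, keeps the minimum rank, and maps that rank back to the category name.
import Mathlib
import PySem

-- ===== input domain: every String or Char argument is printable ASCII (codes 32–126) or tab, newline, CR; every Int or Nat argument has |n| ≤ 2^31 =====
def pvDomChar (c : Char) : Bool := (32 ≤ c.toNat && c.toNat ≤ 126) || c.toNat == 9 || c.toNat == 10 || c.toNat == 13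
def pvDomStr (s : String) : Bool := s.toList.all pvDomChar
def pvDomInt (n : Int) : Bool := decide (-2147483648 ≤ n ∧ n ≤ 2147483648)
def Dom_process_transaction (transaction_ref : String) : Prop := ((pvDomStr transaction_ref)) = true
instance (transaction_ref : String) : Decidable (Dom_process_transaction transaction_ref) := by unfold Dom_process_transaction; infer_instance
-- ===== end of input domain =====

-- B replaces A's keyword-by-keyword elif cascade by a hash index keyword → priority rank:
-- it enumerates the merchant's substrings of the keyword lengths, looks each up in the
-- dict, keeps the minimum rank and maps it back to the category name (objective: alternative).

-- ===== PORT A =====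
def process_transaction (transaction_ref : String) : String × String :=
  let parts := (PySem.Str.split? transaction_ref "/").getD []  -- sep "/" ≠ "": split? is always some here
  let payment_type := if parts.length > 0 then PySem.Str.lower (PySem.List.pyGetD parts 0 "") else "unknown"
  let merchant := if parts.length > 3 then PySem.Str.strip (PySem.Str.lower (PySem.List.pyGetD parts 3 "")) else ""
  let category :=
    if merchant.isEmpty then "others" else
    if (["swiggy", "zomato", "restaurant", "pizza", "kfc", "mcdonalds"].any (fun kw => PySem.Str.isIn kw merchant)) then "food"
    else if (["netflix", "spotify", "prime", "hotstar", "multiplex", "cinema"].any (fun kw => PySem.Str.isIn kw merchant)) then "entertainment"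
    else if (["udemy", "coursera", "byjus", "edx", "school", "college"].any (fun kw => PySem.Str.isIn kw merchant)) then "education"
    else if (["uber", "ola", "rapido", "irctc", "indigo", "airindia", "railway"].any (fun kw => PySem.Str.isIn kw merchant)) then "travel"
    else if (["amazon", "flipkart", "myntra", "dmart", "bigbazaar", "ajio", "reliance"].any (fun kw => PySem.Str.isIn kw merchant)) then "shopping"
    else if (["electricity", "water", "gas", "bill", "bescom", "recharge"].any (fun kw => PySem.Str.isIn kw merchant)) then "utilities"
    else if (["salary", "payroll", "stipend"].any (fun kw => PySem.Str.isIn kw merchant)) then "salary"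
    else if (["apollo", "pharmeasy", "hospital", "medical", "pharmacy", "health"].any (fun kw => PySem.Str.isIn kw merchant)) then "medical"
    else if (["jio", "vi", "airtel", "bsnl", "telecom"].any (fun kw => PySem.Str.isIn kw merchant)) then "recharge"
    else "others"
  (payment_type, category)

-- ===== PORT B =====
-- CATS of Source B
def pvCats : List String := ["food", "entertainment", "education", "travel", "shopping", "utilities", "salary", "medical", "recharge"]

-- KW_RANK of Source B: keyword → index of its category in CATS (A's priority order)
def pvKwRank : PySem.Dict String Nat := PySem.Dict.mk
  [("swiggy", 0),
   ("zomato", 0),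
   ("restaurant", 0),
   ("pizza", 0),
   ("kfc", 0),
   ("mcdonalds", 0),
   ("netflix", 1),
   ("spotify", 1),
   ("prime", 1),
   ("hotstar", 1),
   ("multiplex", 1),
   ("cinema", 1),
   ("udemy", 2),
   ("coursera", 2),
   ("byjus", 2),
   ("edx", 2),
   ("school", 2),
   ("college", 2),
   ("uber", 3),
   ("ola", 3),
   ("rapido", 3),
   ("irctc", 3),
   ("indigo", 3),
   ("airindia", 3),
   ("railway", 3),
   ("amazon", 4),
   ("flipkart", 4),
   ("myntra", 4),
   ("dmart", 4),
   ("bigbazaar", 4),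
   ("ajio", 4),
   ("reliance", 4),
   ("electricity", 5),
   ("water", 5),
   ("gas", 5),
   ("bill", 5),
   ("bescom", 5),
   ("recharge", 5),
   ("salary", 6),
   ("payroll", 6),
   ("stipend", 6),
   ("apollo", 7),
   ("pharmeasy", 7),
   ("hospital", 7),
   ("medical", 7),
   ("pharmacy", 7),
   ("health", 7),
   ("jio", 8),
   ("vi", 8),
   ("airtel", 8),
   ("bsnl", 8),
   ("telecom", 8)]

-- KW_LENS of Source B: the distinct keyword lengths, sorted (= sorted({len(k) for k in KW_RANK}))
def pvLens : List Nat := [2, 3, 4, 5, 6, 7, 8, 9, 10, 11]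

def process_transaction_alt (transaction_ref : String) : String × String :=
  let parts := (PySem.Str.split? transaction_ref "/").getD []  -- sep "/" ≠ "": split? is always some here
  let payment_type := if parts.length > 0 then PySem.Str.lower (PySem.List.pyGetD parts 0 "") else "unknown"
  let merchant := if parts.length > 3 then PySem.Str.strip (PySem.Str.lower (PySem.List.pyGetD parts 3 "")) else ""
  let best := (PySem.List.pyRange 0 (PySem.Str.len merchant) 1).foldl (fun b i =>
      pvLens.foldl (fun b L =>
        min b (pvKwRank.getD (PySem.Str.slice merchant (some i) (some (i + (L : Int)))) pvCats.length)) b)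
    pvCats.length
  let category := if best < pvCats.length then pvCats.getD best "others" else "others"
  (payment_type, category)

-- ===== PRECONDITION & SPEC =====
def Spec_process_transaction (transaction_ref : String) (out : String × String) : Prop := out = process_transaction_alt transaction_ref
instance (transaction_ref : String) (out : String × String) : Decidable (Spec_process_transaction transaction_ref out) := by unfold Spec_process_transaction; infer_instance

-- ===== CLAIM (what is proved, stated in full; the proofs are below) =====
def Claim_equal_process_transaction : Prop := ∀ (transaction_ref : String), Dom_process_transaction transaction_ref → Spec_process_transaction transaction_ref (process_transaction transaction_ref)

-- ===== LEMMAS AND PROOFS =====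

-- A's nine keyword groups, in priority order (proof-side view of A's literal lists)
def pvGroups : List (List String) :=
  [["swiggy", "zomato", "restaurant", "pizza", "kfc", "mcdonalds"],
   ["netflix", "spotify", "prime", "hotstar", "multiplex", "cinema"],
   ["udemy", "coursera", "byjus", "edx", "school", "college"],
   ["uber", "ola", "rapido", "irctc", "indigo", "airindia", "railway"],
   ["amazon", "flipkart", "myntra", "dmart", "bigbazaar", "ajio", "reliance"],
   ["electricity", "water", "gas", "bill", "bescom", "recharge"],
   ["salary", "payroll", "stipend"],
   ["apollo", "pharmeasy", "hospital", "medical", "pharmacy", "health"],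
   ["jio", "vi", "airtel", "bsnl", "telecom"]]

-- A's category computation, written via pvGroups (definitionally equal to port A's cascade)
def pvACat (m : String) : String :=
  if m.isEmpty then "others" else
  if ((pvGroups.getD 0 []).any (fun kw => PySem.Str.isIn kw m)) then "food"
  else if ((pvGroups.getD 1 []).any (fun kw => PySem.Str.isIn kw m)) then "entertainment"
  else if ((pvGroups.getD 2 []).any (fun kw => PySem.Str.isIn kw m)) then "education"
  else if ((pvGroups.getD 3 []).any (fun kw => PySem.Str.isIn kw m)) then "travel"
  else if ((pvGroups.getD 4 []).any (fun kw => PySem.Str.isIn kw m)) then "shopping"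
  else if ((pvGroups.getD 5 []).any (fun kw => PySem.Str.isIn kw m)) then "utilities"
  else if ((pvGroups.getD 6 []).any (fun kw => PySem.Str.isIn kw m)) then "salary"
  else if ((pvGroups.getD 7 []).any (fun kw => PySem.Str.isIn kw m)) then "medical"
  else if ((pvGroups.getD 8 []).any (fun kw => PySem.Str.isIn kw m)) then "recharge"
  else "others"

-- B's category computation (definitionally equal to port B's fold + select)
def pvBestRank (m : String) : Nat :=
  (PySem.List.pyRange 0 (PySem.Str.len m) 1).foldl (fun b i =>
      pvLens.foldl (fun b L =>
        min b (pvKwRank.getD (PySem.Str.slice m (some i) (some (i + (L : Int)))) pvCats.length)) b)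
    pvCats.length

def pvBCat (m : String) : String :=
  if pvBestRank m < pvCats.length then pvCats.getD (pvBestRank m) "others" else "others"

-- the rank looked up at one substring
def pvRankAt (m : String) (i : Int) (L : Nat) : Nat :=
  pvKwRank.getD (PySem.Str.slice m (some i) (some (i + (L : Int)))) pvCats.length

-- all looked-up ranks
def pvHits (m : String) : List Nat :=
  (PySem.List.pyRange 0 (PySem.Str.len m) 1).flatMap (fun i => pvLens.map (fun L => pvRankAt m i L))

theorem pv_foldl_min_map {α : Type} (f : α → Nat) (l : List α) (a : Nat) :
    l.foldl (fun b x => min b (f x)) a = (l.map f).foldl min a := by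
  induction l generalizing a with
  | nil => rfl
  | cons x xs ih => simp [List.foldl_cons, ih]

theorem pv_foldl_min_flat {α β : Type} (f : α → β → Nat) (outer : List α) (inner : List β) (a : Nat) :
    outer.foldl (fun b i => inner.foldl (fun b L => min b (f i L)) b) a
      = (outer.flatMap (fun i => inner.map (f i))).foldl min a := by
  induction outer generalizing a with
  | nil => rfl
  | cons x xs ih => rw [List.foldl_cons, List.flatMap_cons, List.foldl_append, ih, pv_foldl_min_map (f x) inner]

theorem pv_bestRank_eq (m : String) : pvBestRank m = (pvHits m).foldl min pvCats.length := by
  unfold pvBestRank pvHits pvRankAt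
  exact pv_foldl_min_flat _ _ _ _

theorem pv_foldl_min_le_init (l : List Nat) (a : Nat) : l.foldl min a ≤ a := by
  induction l generalizing a with
  | nil => simp [List.foldl_nil]
  | cons x xs ih => exact le_trans (ih (min a x)) (min_le_left a x)

theorem pv_foldl_min_le_mem (l : List Nat) (a x : Nat) (hx : x ∈ l) : l.foldl min a ≤ x := by
  induction l generalizing a with
  | nil => cases hx
  | cons y ys ih =>
    rcases List.mem_cons.mp hx with h | h
    · subst h; exact le_trans (pv_foldl_min_le_init ys (min a x)) (min_le_right a x)
    · exact ih (min a y) h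


theorem pv_foldl_min_mem (l : List Nat) (a : Nat) : l.foldl min a = a ∨ l.foldl min a ∈ l := by
  induction l generalizing a with
  | nil => exact Or.inl rfl
  | cons x xs ih =>
    rcases ih (min a x) with h | h
    · rcases Nat.le_total a x with hax | hxa
      · left; simpa [Nat.min_eq_left hax] using h
      · right; simp only [List.foldl_cons]; rw [h, Nat.min_eq_right hxa]; exact List.mem_cons_self
    · right; exact List.mem_cons_of_mem x h

-- finite facts about the literal table (kernel calculations)
theorem pv_nodup_keys : (pvKwRank.keys).Nodup := by decide

theorem pv_items_facts : ∀ p ∈ pvKwRank.items, p.1.toList.length ∈ pvLens ∧ p.1.toList ≠ [] ∧ p.2 < pvCats.length := by decide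

theorem pv_items_group : ∀ p ∈ pvKwRank.items, p.1 ∈ pvGroups.getD p.2 [] := by decide

theorem pv_group_items : ∀ c ∈ List.range pvCats.length, ∀ kw ∈ pvGroups.getD c [], (kw, c) ∈ pvKwRank.items := by decide

-- soundness: every looked-up rank is either the default or the rank of a keyword occurring in m
theorem pv_hits_sound (m : String) (v : Nat) (hv : v ∈ pvHits m) :
    v = pvCats.length ∨ ∃ kw, (kw, v) ∈ pvKwRank.items ∧ PySem.Str.isIn kw m = true := by
  unfold pvHits at hv
  rcases List.mem_flatMap.mp hv with ⟨i, hi, hv⟩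
  rcases List.mem_map.mp hv with ⟨L, _, hv⟩
  subst hv
  unfold pvRankAt
  rcases hg : pvKwRank.get? (PySem.Str.slice m (some i) (some (i + (L : Int)))) with _ | r
  · left
    rw [PySem.Dict.getD_eq_get?_getD, hg]
    rfl
  · right
    refine ⟨PySem.Str.slice m (some i) (some (i + (L : Int))), ?_, ?_⟩
    · rw [PySem.Dict.getD_eq_get?_getD, hg]
      exact PySem.Dict.mem_items_of_get?_eq_some _ hg
    · -- a slice of m is an infix of m
      have h0i : 0 ≤ i := (PySem.List.mem_pyRange_one.mp hi).1
      obtain ⟨j, rfl⟩ : ∃ j : Nat, i = (j : Int) := ⟨i.toNat, (Int.toNat_of_nonneg h0i).symm⟩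
      rw [PySem.Str.isIn_iff_infix, PySem.Str.toList_slice, PySem.Chars.slice_eq_listSlice]
      have : ((j : Int) + (L : Int)) = ((j + L : Nat) : Int) := by push_cast; ring
      rw [this, PySem.List.slice_natCast]
      exact ((List.take_prefix _ _).isInfix).trans ((List.drop_suffix _ _).isInfix)

-- completeness: the rank of every keyword occurring in m is looked up
theorem pv_hits_complete (m : String) (kw : String) (r : Nat)
    (hmem : (kw, r) ∈ pvKwRank.items) (hin : PySem.Str.isIn kw m = true) : r ∈ pvHits m := by
  obtain ⟨hL, hne, _⟩ := pv_items_facts (kw, r) hmem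
  rcases (PySem.Str.isIn_iff_infix kw m).mp hin with ⟨sp, tp, hsplit⟩
  have hjL : sp.length + kw.toList.length ≤ m.toList.length := by
    rw [← hsplit]; simp [List.length_append]
  have hkw1 : 1 ≤ kw.toList.length := by
    cases hk : kw.toList with
    | nil => exact absurd hk hne
    | cons c cs => simp
  have hslice : PySem.Str.slice m (some (sp.length : Int))
      (some ((sp.length : Int) + (kw.toList.length : Int))) = kw := by
    apply String.toList_inj.mp
    rw [PySem.Str.toList_slice, PySem.Chars.slice_eq_listSlice]
    have : ((sp.length : Int) + (kw.toList.length : Int)) = ((sp.length + kw.toList.length : Nat) : Int) := by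
      push_cast; ring
    rw [this, PySem.List.slice_natCast, ← hsplit]
    rw [List.append_assoc] at *
    rw [List.drop_left]
    simp
  unfold pvHits
  apply List.mem_flatMap.mpr
  refine ⟨(sp.length : Int), ?_, ?_⟩
  · apply PySem.List.mem_pyRange_one.mpr
    constructor
    · positivity
    · rw [PySem.Str.len_eq]
      omega
  · apply List.mem_map.mpr
    refine ⟨kw.toList.length, hL, ?_⟩
    unfold pvRankAt
    rw [hslice]
    exact PySem.Dict.getD_of_mem_items _ hmem pv_nodup_keys _

theorem pv_bestRank_cases (m : String) :
    pvBestRank m = pvCats.length ∨ ∃ kw, (kw, pvBestRank m) ∈ pvKwRank.items ∧ PySem.Str.isIn kw m = true := by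
  rw [pv_bestRank_eq]
  rcases pv_foldl_min_mem (pvHits m) pvCats.length with h | h
  · exact Or.inl h
  · exact pv_hits_sound m _ h

theorem pv_cat_eq (m : String) : pvACat m = pvBCat m := by
  have hany_le : ∀ c : Nat, ((pvGroups.getD c []).any (fun kw => PySem.Str.isIn kw m)) = true →
      pvBestRank m ≤ c := by
    intro c hc
    rcases List.any_eq_true.mp hc with ⟨kw, hkw, hin⟩
    have hclt : c < pvCats.length := by
      by_contra hge
      rw [List.getD_eq_default] at hkw
      · cases hkw
      · simpa [pvGroups, pvCats] using hge
    have hmem : (kw, c) ∈ pvKwRank.items :=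
      pv_group_items c (List.mem_range.mpr hclt) kw hkw
    rw [pv_bestRank_eq]
    exact pv_foldl_min_le_mem _ _ _ (pv_hits_complete m kw c hmem hin)
  have hbest_le9 : pvBestRank m ≤ pvCats.length := by
    rw [pv_bestRank_eq]; exact pv_foldl_min_le_init _ _
  rcases Nat.lt_or_ge (pvBestRank m) pvCats.length with hlt | hge9
  · -- some keyword matched: the best rank's group fires and no earlier group does
    have hbc : pvBCat m = pvCats.getD (pvBestRank m) "others" := by
      unfold pvBCat; rw [if_pos hlt]
    rcases pv_bestRank_cases m with h9 | ⟨kw, hmem, hin⟩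
    · omega
    have hgrp : kw ∈ pvGroups.getD (pvBestRank m) [] := pv_items_group (kw, pvBestRank m) hmem
    have hne_m : m.isEmpty = false := by
      obtain ⟨_, hne, _⟩ := pv_items_facts (kw, pvBestRank m) hmem
      rcases (PySem.Str.isIn_iff_infix kw m).mp hin with ⟨sp, tp, hsplit⟩
      rcases Bool.eq_false_or_eq_true m.isEmpty with h | h
      · exfalso
        have hm : m = "" := String.isEmpty_iff.mp h
        rw [hm] at hsplit
        simp at hsplit
        exact hne (by simp [hsplit.2.1])
      · exact h
    have htrue : ((pvGroups.getD (pvBestRank m) []).any (fun kw => PySem.Str.isIn kw m)) = true :=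
      List.any_eq_true.mpr ⟨kw, hgrp, hin⟩
    have hfalse : ∀ c : Nat, c < pvBestRank m →
        ((pvGroups.getD c []).any (fun kw => PySem.Str.isIn kw m)) = false := by
      intro c hc
      rcases Bool.eq_false_or_eq_true ((pvGroups.getD c []).any (fun kw => PySem.Str.isIn kw m)) with h | h
      · exact absurd (hany_le c h) (by omega)
      · exact h
    rw [hbc]
    have hlt9 : pvBestRank m < 9 := by simpa [pvCats] using hlt
    set b := pvBestRank m with hb
    clear_value b
    interval_cases b
    · -- best = 0
      unfold pvACat
      rw [if_neg (by simp [hne_m])]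
      rw [if_pos htrue]
      rfl
    · -- best = 1
      have e0 : ((pvGroups.getD 0 []).any (fun kw => PySem.Str.isIn kw m)) = false := hfalse 0 (by omega)
      unfold pvACat
      rw [if_neg (by simp [hne_m])]
      rw [if_neg (by rw [e0]; simp)]
      rw [if_pos htrue]
      rfl
    · -- best = 2
      have e0 : ((pvGroups.getD 0 []).any (fun kw => PySem.Str.isIn kw m)) = false := hfalse 0 (by omega)
      have e1 : ((pvGroups.getD 1 []).any (fun kw => PySem.Str.isIn kw m)) = false := hfalse 1 (by omega)
      unfold pvACat
      rw [if_neg (by simp [hne_m])]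
      rw [if_neg (by rw [e0]; simp)]
      rw [if_neg (by rw [e1]; simp)]
      rw [if_pos htrue]
      rfl
    · -- best = 3
      have e0 : ((pvGroups.getD 0 []).any (fun kw => PySem.Str.isIn kw m)) = false := hfalse 0 (by omega)
      have e1 : ((pvGroups.getD 1 []).any (fun kw => PySem.Str.isIn kw m)) = false := hfalse 1 (by omega)
      have e2 : ((pvGroups.getD 2 []).any (fun kw => PySem.Str.isIn kw m)) = false := hfalse 2 (by omega)
      unfold pvACat
      rw [if_neg (by simp [hne_m])]
      rw [if_neg (by rw [e0]; simp)]
      rw [if_neg (by rw [e1]; simp)]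
      rw [if_neg (by rw [e2]; simp)]
      rw [if_pos htrue]
      rfl
    · -- best = 4
      have e0 : ((pvGroups.getD 0 []).any (fun kw => PySem.Str.isIn kw m)) = false := hfalse 0 (by omega)
      have e1 : ((pvGroups.getD 1 []).any (fun kw => PySem.Str.isIn kw m)) = false := hfalse 1 (by omega)
      have e2 : ((pvGroups.getD 2 []).any (fun kw => PySem.Str.isIn kw m)) = false := hfalse 2 (by omega)
      have e3 : ((pvGroups.getD 3 []).any (fun kw => PySem.Str.isIn kw m)) = false := hfalse 3 (by omega)
      unfold pvACat
      rw [if_neg (by simp [hne_m])]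
      rw [if_neg (by rw [e0]; simp)]
      rw [if_neg (by rw [e1]; simp)]
      rw [if_neg (by rw [e2]; simp)]
      rw [if_neg (by rw [e3]; simp)]
      rw [if_pos htrue]
      rfl
    · -- best = 5
      have e0 : ((pvGroups.getD 0 []).any (fun kw => PySem.Str.isIn kw m)) = false := hfalse 0 (by omega)
      have e1 : ((pvGroups.getD 1 []).any (fun kw => PySem.Str.isIn kw m)) = false := hfalse 1 (by omega)
      have e2 : ((pvGroups.getD 2 []).any (fun kw => PySem.Str.isIn kw m)) = false := hfalse 2 (by omega)
      have e3 : ((pvGroups.getD 3 []).any (fun kw => PySem.Str.isIn kw m)) = false := hfalse 3 (by omega)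
      have e4 : ((pvGroups.getD 4 []).any (fun kw => PySem.Str.isIn kw m)) = false := hfalse 4 (by omega)
      unfold pvACat
      rw [if_neg (by simp [hne_m])]
      rw [if_neg (by rw [e0]; simp)]
      rw [if_neg (by rw [e1]; simp)]
      rw [if_neg (by rw [e2]; simp)]
      rw [if_neg (by rw [e3]; simp)]
      rw [if_neg (by rw [e4]; simp)]
      rw [if_pos htrue]
      rfl
    · -- best = 6
      have e0 : ((pvGroups.getD 0 []).any (fun kw => PySem.Str.isIn kw m)) = false := hfalse 0 (by omega)
      have e1 : ((pvGroups.getD 1 []).any (fun kw => PySem.Str.isIn kw m)) = false := hfalse 1 (by omega)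
      have e2 : ((pvGroups.getD 2 []).any (fun kw => PySem.Str.isIn kw m)) = false := hfalse 2 (by omega)
      have e3 : ((pvGroups.getD 3 []).any (fun kw => PySem.Str.isIn kw m)) = false := hfalse 3 (by omega)
      have e4 : ((pvGroups.getD 4 []).any (fun kw => PySem.Str.isIn kw m)) = false := hfalse 4 (by omega)
      have e5 : ((pvGroups.getD 5 []).any (fun kw => PySem.Str.isIn kw m)) = false := hfalse 5 (by omega)
      unfold pvACat
      rw [if_neg (by simp [hne_m])]
      rw [if_neg (by rw [e0]; simp)]
      rw [if_neg (by rw [e1]; simp)]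
      rw [if_neg (by rw [e2]; simp)]
      rw [if_neg (by rw [e3]; simp)]
      rw [if_neg (by rw [e4]; simp)]
      rw [if_neg (by rw [e5]; simp)]
      rw [if_pos htrue]
      rfl
    · -- best = 7
      have e0 : ((pvGroups.getD 0 []).any (fun kw => PySem.Str.isIn kw m)) = false := hfalse 0 (by omega)
      have e1 : ((pvGroups.getD 1 []).any (fun kw => PySem.Str.isIn kw m)) = false := hfalse 1 (by omega)
      have e2 : ((pvGroups.getD 2 []).any (fun kw => PySem.Str.isIn kw m)) = false := hfalse 2 (by omega)
      have e3 : ((pvGroups.getD 3 []).any (fun kw => PySem.Str.isIn kw m)) = false := hfalse 3 (by omega)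
      have e4 : ((pvGroups.getD 4 []).any (fun kw => PySem.Str.isIn kw m)) = false := hfalse 4 (by omega)
      have e5 : ((pvGroups.getD 5 []).any (fun kw => PySem.Str.isIn kw m)) = false := hfalse 5 (by omega)
      have e6 : ((pvGroups.getD 6 []).any (fun kw => PySem.Str.isIn kw m)) = false := hfalse 6 (by omega)
      unfold pvACat
      rw [if_neg (by simp [hne_m])]
      rw [if_neg (by rw [e0]; simp)]
      rw [if_neg (by rw [e1]; simp)]
      rw [if_neg (by rw [e2]; simp)]
      rw [if_neg (by rw [e3]; simp)]
      rw [if_neg (by rw [e4]; simp)]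
      rw [if_neg (by rw [e5]; simp)]
      rw [if_neg (by rw [e6]; simp)]
      rw [if_pos htrue]
      rfl
    · -- best = 8
      have e0 : ((pvGroups.getD 0 []).any (fun kw => PySem.Str.isIn kw m)) = false := hfalse 0 (by omega)
      have e1 : ((pvGroups.getD 1 []).any (fun kw => PySem.Str.isIn kw m)) = false := hfalse 1 (by omega)
      have e2 : ((pvGroups.getD 2 []).any (fun kw => PySem.Str.isIn kw m)) = false := hfalse 2 (by omega)
      have e3 : ((pvGroups.getD 3 []).any (fun kw => PySem.Str.isIn kw m)) = false := hfalse 3 (by omega)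
      have e4 : ((pvGroups.getD 4 []).any (fun kw => PySem.Str.isIn kw m)) = false := hfalse 4 (by omega)
      have e5 : ((pvGroups.getD 5 []).any (fun kw => PySem.Str.isIn kw m)) = false := hfalse 5 (by omega)
      have e6 : ((pvGroups.getD 6 []).any (fun kw => PySem.Str.isIn kw m)) = false := hfalse 6 (by omega)
      have e7 : ((pvGroups.getD 7 []).any (fun kw => PySem.Str.isIn kw m)) = false := hfalse 7 (by omega)
      unfold pvACat
      rw [if_neg (by simp [hne_m])]
      rw [if_neg (by rw [e0]; simp)]
      rw [if_neg (by rw [e1]; simp)]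
      rw [if_neg (by rw [e2]; simp)]
      rw [if_neg (by rw [e3]; simp)]
      rw [if_neg (by rw [e4]; simp)]
      rw [if_neg (by rw [e5]; simp)]
      rw [if_neg (by rw [e6]; simp)]
      rw [if_neg (by rw [e7]; simp)]
      rw [if_pos htrue]
      rfl
  · -- nothing matched: both sides fall through to "others"
    have hbest9 : pvBestRank m = pvCats.length := le_antisymm hbest_le9 hge9
    have hfalse : ∀ c : Nat, ((pvGroups.getD c []).any (fun kw => PySem.Str.isIn kw m)) = false := by
      intro c
      rcases Bool.eq_false_or_eq_true ((pvGroups.getD c []).any (fun kw => PySem.Str.isIn kw m)) with h | h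
      · rcases List.any_eq_true.mp h with ⟨kw, hkw, hin⟩
        have hclt : c < pvCats.length := by
          by_contra hge
          rw [List.getD_eq_default] at hkw
          · cases hkw
          · simpa [pvGroups, pvCats] using hge
        exact absurd (hany_le c h) (by omega)
      · exact h
    have hB : pvBCat m = "others" := by
      unfold pvBCat
      rw [hbest9, if_neg (lt_irrefl _)]
    rw [hB]
    unfold pvACat
    rcases Bool.eq_false_or_eq_true m.isEmpty with hm | hm
    · rw [if_pos hm]
    · rw [if_neg (by simp [hm])]
      rw [if_neg (by rw [hfalse 0]; simp)]
      rw [if_neg (by rw [hfalse 1]; simp)]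
      rw [if_neg (by rw [hfalse 2]; simp)]
      rw [if_neg (by rw [hfalse 3]; simp)]
      rw [if_neg (by rw [hfalse 4]; simp)]
      rw [if_neg (by rw [hfalse 5]; simp)]
      rw [if_neg (by rw [hfalse 6]; simp)]
      rw [if_neg (by rw [hfalse 7]; simp)]
      rw [if_neg (by rw [hfalse 8]; simp)]

-- ===== VERDICT (by name: the statement is the Claim_ definition above) =====
theorem process_transaction_spec : Claim_equal_process_transaction := by
  intro s _
  show process_transaction s = process_transaction_alt s
  have h : pvACat ((fun parts => if parts.length > 3 then PySem.Str.strip (PySem.Str.lower (PySem.List.pyGetD parts 3 "")) else "") ((PySem.Str.split? s "/").getD []))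
      = pvBCat ((fun parts => if parts.length > 3 then PySem.Str.strip (PySem.Str.lower (PySem.List.pyGetD parts 3 "")) else "") ((PySem.Str.split? s "/").getD [])) :=
    pv_cat_eq _
  show (_, pvACat _) = (_, pvBCat _)
  exact congrArg _ h
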